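-- pv_equiv track=rewrite | github.com/CLAIRE-Fivepoints/claire-plugin | domain/scripts/ado_fetch_attachments/tests/conftest.py | _build_document_xml
-- ===== SOURCE A (Python) =====
-- def _build_document_xml(sections: list[tuple[int, str]], image_anchors: list[str]) -> str:
--     """Build a word/document.xml with the given heading/image layout.
--
--     Args:
--         sections: list of (level, title) tuples in document order.
--         image_anchors: list of heading titles that should carry an image after them.
--     """
--     parts: list[str] = [
--         '<?xml version="1.0" encoding="UTF-8" standalone="yes"?>',
--         '<w:document xmlns:w="http://schemas.openxmlformats.org/wordprocessingml/2006/main"',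
--         '            xmlns:r="http://schemas.openxmlformats.org/officeDocument/2006/relationships"',
--         '            xmlns:wp="http://schemas.openxmlformats.org/drawingml/2006/wordprocessingDrawing"',
--         '            xmlns:a="http://schemas.openxmlformats.org/drawingml/2006/main"',
--         '            xmlns:pic="http://schemas.openxmlformats.org/drawingml/2006/picture">',
--         "  <w:body>",
--     ]
--
--     img_index = 0
--     for level, title in sections:
--         parts.extend(
--             [
--                 "    <w:p>",
--                 "      <w:pPr>",
--                 f'        <w:pStyle w:val="Heading{level}"/>',
--                 "      </w:pPr>",
--                 f"      <w:r><w:t>{title}</w:t></w:r>",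
--                 "    </w:p>",
--             ]
--         )
--         parts.extend(
--             [
--                 "    <w:p>",
--                 f"      <w:r><w:t>Body under {title}.</w:t></w:r>",
--                 "    </w:p>",
--             ]
--         )
--         if title in image_anchors:
--             img_index += 1
--             rid = f"rId{10 + img_index}"
--             parts.extend(
--                 [
--                     "    <w:p>",
--                     "      <w:r>",
--                     "        <w:drawing>",
--                     '          <wp:inline distT="0" distB="0" distL="0" distR="0">',
--                     "            <a:graphic>",
--                     '              <a:graphicData uri="http://schemas.openxmlformats.org/drawingml/2006/picture">',
--                     "                <pic:pic>",
--                     "                  <pic:blipFill>",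
--                     f'                    <a:blip r:embed="{rid}"/>',
--                     "                  </pic:blipFill>",
--                     "                </pic:pic>",
--                     "              </a:graphicData>",
--                     "            </a:graphic>",
--                     "          </wp:inline>",
--                     "        </w:drawing>",
--                     "      </w:r>",
--                     "    </w:p>",
--                 ]
--             )
--
--     parts.extend(["  </w:body>", "</w:document>"])
--     return "\n".join(parts)
-- ===== SOURCE B (Python) =====
-- _HEADER = [
--     '<?xml version="1.0" encoding="UTF-8" standalone="yes"?>',
--     '<w:document xmlns:w="http://schemas.openxmlformats.org/wordprocessingml/2006/main"',
--     '            xmlns:r="http://schemas.openxmlformats.org/officeDocument/2006/relationships"',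
--     '            xmlns:wp="http://schemas.openxmlformats.org/drawingml/2006/wordprocessingDrawing"',
--     '            xmlns:a="http://schemas.openxmlformats.org/drawingml/2006/main"',
--     '            xmlns:pic="http://schemas.openxmlformats.org/drawingml/2006/picture">',
--     "  <w:body>",
-- ]
--
--
-- def _heading_lines(level: int, title: str) -> list[str]:
--     return [
--         "    <w:p>",
--         "      <w:pPr>",
--         f'        <w:pStyle w:val="Heading{level}"/>',
--         "      </w:pPr>",
--         f"      <w:r><w:t>{title}</w:t></w:r>",
--         "    </w:p>",
--     ]
--
--
-- def _body_lines(title: str) -> list[str]: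
--     return [
--         "    <w:p>",
--         f"      <w:r><w:t>Body under {title}.</w:t></w:r>",
--         "    </w:p>",
--     ]
--
--
-- def _image_lines(rid: str) -> list[str]:
--     return [
--         "    <w:p>",
--         "      <w:r>",
--         "        <w:drawing>",
--         '          <wp:inline distT="0" distB="0" distL="0" distR="0">',
--         "            <a:graphic>",
--         '              <a:graphicData uri="http://schemas.openxmlformats.org/drawingml/2006/picture">',
--         "                <pic:pic>",
--         "                  <pic:blipFill>",
--         f'                    <a:blip r:embed="{rid}"/>',
--         "                  </pic:blipFill>",
--         "                </pic:pic>",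
--         "              </a:graphicData>",
--         "            </a:graphic>",
--         "          </wp:inline>",
--         "        </w:drawing>",
--         "      </w:r>",
--         "    </w:p>",
--     ]
--
--
-- def _build_document_xml(sections: list[tuple[int, str]], image_anchors: list[str]) -> str:
--     # Pass 1: decide image placement and rid numbering up front, keyed by position.
--     anchors = set(image_anchors)
--     rids: dict[int, str] = {}
--     count = 0
--     for i, (_level, title) in enumerate(sections):
--         if title in anchors:
--             count += 1
--             rids[i] = f"rId{10 + count}"
--     # Pass 2: emit every section, attaching the precomputed image block where present.
--     parts = list(_HEADER)
--     for i, (level, title) in enumerate(sections):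
--         parts += _heading_lines(level, title)
--         parts += _body_lines(title)
--         if i in rids:
--             parts += _image_lines(rids[i])
--     parts += ["  </w:body>", "</w:document>"]
--     return "\n".join(parts)
-- ===== Notes on version B (the rewrite author's own statement) =====
-- stated objective: alternative
-- what changed: A interleaves rid numbering with emission in one stateful loop scanning the anchor list per section; B first precomputes a position-keyed map of image rids in one pass over a deduplicated anchor set, then a second pass emits every section and attaches the precomputed image block by index.
import Mathlib
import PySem

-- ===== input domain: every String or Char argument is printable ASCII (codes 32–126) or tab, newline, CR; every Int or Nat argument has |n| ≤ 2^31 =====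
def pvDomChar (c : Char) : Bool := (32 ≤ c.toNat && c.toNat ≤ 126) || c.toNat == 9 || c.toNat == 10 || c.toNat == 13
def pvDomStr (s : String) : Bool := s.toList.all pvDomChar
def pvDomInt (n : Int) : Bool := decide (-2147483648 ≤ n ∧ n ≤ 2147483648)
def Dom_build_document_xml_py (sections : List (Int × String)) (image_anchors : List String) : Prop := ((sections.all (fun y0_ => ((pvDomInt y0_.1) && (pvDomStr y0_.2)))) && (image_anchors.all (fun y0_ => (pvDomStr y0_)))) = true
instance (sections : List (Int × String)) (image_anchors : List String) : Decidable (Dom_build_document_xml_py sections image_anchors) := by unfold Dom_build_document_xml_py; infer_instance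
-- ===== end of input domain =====

-- B is a different decomposition: two passes — a position-keyed rid map built up front over a deduplicated anchor set, then emission; a timing run measured B faster.

-- Shared string blocks (pure literals, used by both ports).
def pvHeaderLines : List String :=
  ["<?xml version=\"1.0\" encoding=\"UTF-8\" standalone=\"yes\"?>",
   "<w:document xmlns:w=\"http://schemas.openxmlformats.org/wordprocessingml/2006/main\"",
   "            xmlns:r=\"http://schemas.openxmlformats.org/officeDocument/2006/relationships\"",
   "            xmlns:wp=\"http://schemas.openxmlformats.org/drawingml/2006/wordprocessingDrawing\"",
   "            xmlns:a=\"http://schemas.openxmlformats.org/drawingml/2006/main\"",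
   "            xmlns:pic=\"http://schemas.openxmlformats.org/drawingml/2006/picture\">",
   "  <w:body>"]

def pvHeadingLines (level : Int) (title : String) : List String :=
  ["    <w:p>",
   "      <w:pPr>",
   "        <w:pStyle w:val=\"Heading" ++ PySem.Int.toStr level ++ "\"/>",
   "      </w:pPr>",
   "      <w:r><w:t>" ++ title ++ "</w:t></w:r>",
   "    </w:p>"]

def pvBodyLines (title : String) : List String :=
  ["    <w:p>",
   "      <w:r><w:t>Body under " ++ title ++ ".</w:t></w:r>",
   "    </w:p>"]

def pvImageLines (rid : String) : List String :=
  ["    <w:p>",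
   "      <w:r>",
   "        <w:drawing>",
   "          <wp:inline distT=\"0\" distB=\"0\" distL=\"0\" distR=\"0\">",
   "            <a:graphic>",
   "              <a:graphicData uri=\"http://schemas.openxmlformats.org/drawingml/2006/picture\">",
   "                <pic:pic>",
   "                  <pic:blipFill>",
   "                    <a:blip r:embed=\"" ++ rid ++ "\"/>",
   "                  </pic:blipFill>",
   "                </pic:pic>",
   "              </a:graphicData>",
   "            </a:graphic>",
   "          </wp:inline>",
   "        </w:drawing>",
   "      </w:r>",
   "    </w:p>"]

-- ===== PORT A =====
-- A's single loop body: emit heading + body, and on an anchored title bump the counter and emit the image.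
def pvAStep (image_anchors : List String) (st : List String × Int) (s : Int × String) : List String × Int :=
  let parts := st.1 ++ pvHeadingLines s.1 s.2
  let parts := parts ++ pvBodyLines s.2
  if image_anchors.contains s.2 then
    let img_index := st.2 + 1
    let rid := "rId" ++ PySem.Int.toStr (10 + img_index)
    (parts ++ pvImageLines rid, img_index)
  else
    (parts, st.2)

def build_document_xml_py (sections : List (Int × String)) (image_anchors : List String) : String :=
  PySem.Str.join "\n"
    ((sections.foldl (pvAStep image_anchors) (pvHeaderLines, (0 : Int))).1
      ++ ["  </w:body>", "</w:document>"])

-- ===== PORT B =====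
-- B's pass 1 body: record rid for each anchored position.
def pvRidStep (anchors : PySem.Set String) (st : PySem.Dict Int String × Int) (p : Int × (Int × String)) : PySem.Dict Int String × Int :=
  if PySem.Set.contains anchors p.2.2 then
    (st.1.insert p.1 ("rId" ++ PySem.Int.toStr (10 + (st.2 + 1))), st.2 + 1)
  else st

-- B's pass 2 body: always emit heading + body, append the precomputed image block when present.
def pvEmitStep (rids : PySem.Dict Int String) (acc : List String) (p : Int × (Int × String)) : List String :=
  let acc := acc ++ pvHeadingLines p.2.1 p.2.2 ++ pvBodyLines p.2.2
  match rids.get? p.1 with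
  | some rid => acc ++ pvImageLines rid
  | none => acc

def build_document_xml_py_alt (sections : List (Int × String)) (image_anchors : List String) : String :=
  PySem.Str.join "\n"
    (((PySem.List.enumerate sections 0).foldl
        (pvEmitStep
          (((PySem.List.enumerate sections 0).foldl
              (pvRidStep (PySem.Set.ofList image_anchors)) (PySem.Dict.empty, (0 : Int))).1))
        pvHeaderLines)
      ++ ["  </w:body>", "</w:document>"])

-- ===== PRECONDITION & SPEC =====
def Spec_build_document_xml_py (sections : List (Int × String)) (image_anchors : List String) (out : String) : Prop := out = build_document_xml_py_alt sections image_anchors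
instance (sections : List (Int × String)) (image_anchors : List String) (out : String) : Decidable (Spec_build_document_xml_py sections image_anchors out) := by unfold Spec_build_document_xml_py; infer_instance

-- ===== CLAIM (what is proved, stated in full; the proofs are below) =====
def Claim_equal_build_document_xml_py : Prop := ∀ (sections : List (Int × String)) (image_anchors : List String), Dom_build_document_xml_py sections image_anchors → Spec_build_document_xml_py sections image_anchors (build_document_xml_py sections image_anchors)

-- ===== LEMMAS AND PROOFS =====

-- Pass 1 only inserts keys ≥ the current enumeration index.
lemma pvRid_get_lt (anchors : PySem.Set String) :
    ∀ (ss : List (Int × String)) (i c : Int) (d : PySem.Dict Int String) (j : Int), j < i →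
      (((PySem.List.enumerate ss i).foldl (pvRidStep anchors) (d, c)).1).get? j = d.get? j := by
  intro ss
  induction ss with
  | nil => intro i c d j _; simp [PySem.List.enumerate_nil]
  | cons s ss ih =>
    intro i c d j hj
    rw [PySem.List.enumerate_cons]
    simp only [List.foldl_cons]
    by_cases h : PySem.Set.contains anchors s.2 = true
    · have hm : s.2 ∈ anchors := by simpa using h
      rw [show pvRidStep anchors (d, c) (i, s)
          = (d.insert i ("rId" ++ PySem.Int.toStr (10 + (c + 1))), c + 1) from by
        simp [pvRidStep, hm]]
      rw [ih (i + 1) (c + 1) _ j (by omega)]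
      exact PySem.Dict.get?_insert_of_ne _ _ (by omega)
    · have hm : s.2 ∉ anchors := by simpa using h
      rw [show pvRidStep anchors (d, c) (i, s) = (d, c) from by simp [pvRidStep, hm]]
      exact ih (i + 1) c d j (by omega)

-- Membership in the deduplicated anchor set is list membership.
lemma pvContains_ofList (xs : List String) (t : String) :
    PySem.Set.contains (PySem.Set.ofList xs) t = xs.contains t := by
  simp [pysem]

-- Core loop correspondence: B's second pass over the precomputed rid map
-- retraces A's single counting loop, for any start index, counter and seed dict
-- that is empty at the indices still to come.
lemma pvLoop_eq (ians : List String) :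
    ∀ (ss : List (Int × String)) (i c : Int) (d : PySem.Dict Int String) (acc : List String),
      (∀ j : Int, i ≤ j → d.get? j = none) →
      (PySem.List.enumerate ss i).foldl
          (pvEmitStep (((PySem.List.enumerate ss i).foldl (pvRidStep (PySem.Set.ofList ians)) (d, c)).1)) acc
        = (ss.foldl (pvAStep ians) (acc, c)).1 := by
  intro ss
  induction ss with
  | nil => intro i c d acc _; simp [PySem.List.enumerate_nil]
  | cons s ss ih =>
    intro i c d acc hd
    rw [PySem.List.enumerate_cons]
    simp only [List.foldl_cons]
    by_cases h : ians.contains s.2 = true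
    · have hm : s.2 ∈ ians := by simpa using h
      have hc : PySem.Set.contains (PySem.Set.ofList ians) s.2 = true := by
        rw [pvContains_ofList]; simpa using hm
      have hstep : pvRidStep (PySem.Set.ofList ians) (d, c) (i, s)
          = (d.insert i ("rId" ++ PySem.Int.toStr (10 + (c + 1))), c + 1) := by
        simp [pvRidStep, hm]
      rw [hstep]
      have hget : (((PySem.List.enumerate ss (i + 1)).foldl (pvRidStep (PySem.Set.ofList ians))
            (d.insert i ("rId" ++ PySem.Int.toStr (10 + (c + 1))), c + 1)).1).get? i
          = some ("rId" ++ PySem.Int.toStr (10 + (c + 1))) := by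
        rw [pvRid_get_lt _ _ _ _ _ _ (by omega)]
        exact PySem.Dict.get?_insert_self _ _ _
      have hemit : pvEmitStep (((PySem.List.enumerate ss (i + 1)).foldl (pvRidStep (PySem.Set.ofList ians))
            (d.insert i ("rId" ++ PySem.Int.toStr (10 + (c + 1))), c + 1)).1) acc (i, s)
          = acc ++ pvHeadingLines s.1 s.2 ++ pvBodyLines s.2
              ++ pvImageLines ("rId" ++ PySem.Int.toStr (10 + (c + 1))) := by
        simp [pvEmitStep, hget]
      rw [hemit]
      rw [ih (i + 1) (c + 1) _ _ (fun j hj => by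
        rw [PySem.Dict.get?_insert_of_ne _ _ (by omega)]
        exact hd j (by omega))]
      have hA : pvAStep ians (acc, c) s
          = (acc ++ pvHeadingLines s.1 s.2 ++ pvBodyLines s.2
              ++ pvImageLines ("rId" ++ PySem.Int.toStr (10 + (c + 1))), c + 1) := by
        simp [pvAStep, hm, List.append_assoc]
      rw [hA]
    · have hm : s.2 ∉ ians := by simpa using h
      have hc : PySem.Set.contains (PySem.Set.ofList ians) s.2 = false := by
        rw [pvContains_ofList]; simpa using hm
      have hstep : pvRidStep (PySem.Set.ofList ians) (d, c) (i, s) = (d, c) := by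
        simp [pvRidStep, hm]
      rw [hstep]
      have hget : (((PySem.List.enumerate ss (i + 1)).foldl (pvRidStep (PySem.Set.ofList ians))
            (d, c)).1).get? i = none := by
        rw [pvRid_get_lt _ _ _ _ _ _ (by omega)]
        exact hd i (by omega)
      have hemit : pvEmitStep (((PySem.List.enumerate ss (i + 1)).foldl (pvRidStep (PySem.Set.ofList ians))
            (d, c)).1) acc (i, s)
          = acc ++ pvHeadingLines s.1 s.2 ++ pvBodyLines s.2 := by
        simp [pvEmitStep, hget]
      rw [hemit]
      rw [ih (i + 1) c d _ (fun j hj => hd j (by omega))]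
      have hA : pvAStep ians (acc, c) s
          = (acc ++ pvHeadingLines s.1 s.2 ++ pvBodyLines s.2, c) := by
        simp [pvAStep, hm, List.append_assoc]
      rw [hA]

-- ===== VERDICT (by name: the statement is the Claim_ definition above) =====
theorem build_document_xml_py_spec : Claim_equal_build_document_xml_py := by
  intro sections image_anchors _
  unfold Spec_build_document_xml_py build_document_xml_py build_document_xml_py_alt
  rw [pvLoop_eq image_anchors sections 0 0 PySem.Dict.empty pvHeaderLines
    (fun j _ => PySem.Dict.get?_empty j)]
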